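-- pv_equiv track=rewrite | github.com/rampeace/MyLearning | MyLearning/PythonPractice/dsa_practice/arrays/convert2d_to1d.py | convert1d_array_to2d
-- ===== SOURCE A (Python) =====
-- def convert1d_array_to2d(flat_array=None, rows=4, cols=4):
--     """Convert a 1D list into a 2D matrix in row-major order.
--
--     Problem: Convert a 1D array into a 2D array with given dimensions.
--     Approach: Fill rows and columns from the flat list.
--     Time complexity: O(r * c)
--     Space complexity: O(r * c)
--     """
--     if flat_array is None:
--         flat_array = [
--             1, 1, 1, 1,
--             1, 0, 1, 1,
--             1, 1, 0, 1,
--             1, 0, 0, 1,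
--         ]
--
--     if len(flat_array) < rows * cols:
--         raise IndexError("flat_array is too short for the given dimensions")
--
--     result = [[0 for _ in range(cols)] for _ in range(rows)]
--     index = 0
--
--     for row in range(rows):
--         for col in range(cols):
--             result[row][col] = flat_array[index]
--             index += 1
--
--     return result
-- ===== SOURCE B (Python) =====
-- def convert1d_array_to2d(flat_array=None, rows=4, cols=4):
--     """Convert a 1D list into a 2D matrix in row-major order.
--
--     Different strategy from the original: instead of nested row/column
--     loops writing into a preallocated zero matrix through a running
--     index, create one empty bucket per row and make a single pass over
--     the used prefix of the flat list, dispatching element i into bucket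
--     i // cols (its row number in row-major order).
--     """
--     if flat_array is None:
--         flat_array = [
--             1, 1, 1, 1,
--             1, 0, 1, 1,
--             1, 1, 0, 1,
--             1, 0, 0, 1,
--         ]
--
--     if len(flat_array) < rows * cols:
--         raise IndexError("flat_array is too short for the given dimensions")
--
--     buckets = [[] for _ in range(rows)]
--     for i in range(len(buckets) * cols):
--         buckets[i // cols].append(flat_array[i])
--     return buckets
-- ===== Notes on version B (the rewrite author's own statement) =====
-- stated objective: alternative
-- what changed: Replaces the nested row/column loops writing through a running index into a preallocated zero matrix by a bucket dispatch: one empty bucket per row, then a single pass over the used prefix of the flat list appending element i to bucket i // cols.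
import Mathlib
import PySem

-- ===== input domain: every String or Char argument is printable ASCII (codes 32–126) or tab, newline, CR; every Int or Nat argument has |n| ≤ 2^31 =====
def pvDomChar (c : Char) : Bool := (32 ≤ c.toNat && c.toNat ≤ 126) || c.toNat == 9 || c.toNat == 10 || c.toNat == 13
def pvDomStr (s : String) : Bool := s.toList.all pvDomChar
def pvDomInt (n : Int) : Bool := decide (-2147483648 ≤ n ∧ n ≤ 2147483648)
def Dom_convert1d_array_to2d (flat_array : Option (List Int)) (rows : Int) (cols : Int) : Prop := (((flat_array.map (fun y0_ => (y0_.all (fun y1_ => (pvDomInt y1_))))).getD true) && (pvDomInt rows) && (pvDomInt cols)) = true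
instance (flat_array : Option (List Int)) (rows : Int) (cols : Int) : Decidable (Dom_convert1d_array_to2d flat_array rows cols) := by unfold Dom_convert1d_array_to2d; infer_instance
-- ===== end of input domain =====

-- B replaces A's nested row/column loops over a preallocated zero matrix (running index
-- counter) by a bucket dispatch: one empty bucket per row, then a single pass over the
-- used prefix of the flat list appending element i to bucket i // cols
-- (objective: alternative; same O(rows*cols) cost).

-- the default flat array both versions use when flat_array is None
def pvDefault : List Int := [1, 1, 1, 1, 1, 0, 1, 1, 1, 1, 0, 1, 1, 0, 0, 1]

-- ===== PORT A =====
def convert1d_array_to2d (flat_array : Option (List Int)) (rows : Int) (cols : Int) : List (List Int) :=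
  let flat := flat_array.getD pvDefault
  if (flat.length : Int) < rows * cols then
    []  -- Python raises IndexError here; these inputs are excluded by Pre_
  else
    ((PySem.List.pyRange 0 rows 1).foldl
      (fun (st : List (List Int) × Int) row =>
        (PySem.List.pyRange 0 cols 1).foldl
          (fun (st : List (List Int) × Int) col =>
            (PySem.List.pySetD st.1 row
              (PySem.List.pySetD (PySem.List.pyGetD st.1 row []) col
                (PySem.List.pyGetD flat st.2 0)),
             st.2 + 1)) st)
      ((PySem.List.pyRange 0 rows 1).map
        (fun _ => (PySem.List.pyRange 0 cols 1).map (fun _ => (0 : Int))), 0)).1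

-- ===== PORT B =====
-- buckets[i // cols].append(...) becomes List.modify at index (i // cols).toNat; whenever the
-- loop body runs, 0 ≤ i < len(buckets)*cols forces cols > 0 and 0 ≤ i // cols < len(buckets),
-- so the index is always in range (where Python would raise, modify's out-of-range no-op is
-- unreachable).
def convert1d_array_to2d_alt (flat_array : Option (List Int)) (rows : Int) (cols : Int) : List (List Int) :=
  let flat := flat_array.getD pvDefault
  if (flat.length : Int) < rows * cols then
    []  -- Python raises IndexError here; these inputs are excluded by Pre_
  else
    let buckets := (PySem.List.pyRange 0 rows 1).map (fun _ => ([] : List Int))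
    (PySem.List.pyRange 0 ((buckets.length : Int) * cols) 1).foldl
      (fun (bs : List (List Int)) i =>
        bs.modify (PySem.Int.floordiv i cols).toNat
          (fun r => r ++ [PySem.List.pyGetD flat i 0]))
      buckets

-- ===== PRECONDITION & SPEC =====
-- Pre_ excludes exactly the inputs on which A raises IndexError (flat list shorter than rows*cols).
def Pre_convert1d_array_to2d (flat_array : Option (List Int)) (rows : Int) (cols : Int) : Prop :=
  rows * cols ≤ (((flat_array.getD pvDefault).length : Int))
instance (flat_array : Option (List Int)) (rows : Int) (cols : Int) : Decidable (Pre_convert1d_array_to2d flat_array rows cols) := by unfold Pre_convert1d_array_to2d; infer_instance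

def pvWitness_convert1d_array_to2d : Option (List Int) × Int × Int := (none, 4, 4)

def Spec_convert1d_array_to2d (flat_array : Option (List Int)) (rows : Int) (cols : Int) (out : List (List Int)) : Prop := out = convert1d_array_to2d_alt flat_array rows cols
instance (flat_array : Option (List Int)) (rows : Int) (cols : Int) (out : List (List Int)) : Decidable (Spec_convert1d_array_to2d flat_array rows cols out) := by unfold Spec_convert1d_array_to2d; infer_instance

-- ===== CLAIM (what is proved, stated in full; the proofs are below) =====
def Claim_equal_convert1d_array_to2d : Prop := ∀ (flat_array : Option (List Int)) (rows : Int) (cols : Int), Dom_convert1d_array_to2d flat_array rows cols → Pre_convert1d_array_to2d flat_array rows cols → Spec_convert1d_array_to2d flat_array rows cols (convert1d_array_to2d flat_array rows cols)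

-- ===== LEMMAS AND PROOFS =====

-- modifying the list exactly at the border of the append hits the cons head
theorem pvModifyAppend {α : Type} : ∀ (done : List α) (cur : α) (rest : List α) (g : α → α),
    (done ++ cur :: rest).modify done.length g = done ++ g cur :: rest := by
  intro done
  induction done with
  | nil => intro cur rest g; simp
  | cons x d ih =>
    intro cur rest g
    simp only [List.cons_append, List.length_cons, List.modify_succ_cons]
    rw [ih]

-- B's loop over one row's index block [r*cols+j, r*cols+cols): every index dispatches to
-- bucket r, appending the corresponding flat elements.
theorem pvRowB (flat : List Int) (cols : Int) (hc : 0 < cols) :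
    ∀ (k : Nat) (j : Int), 0 ≤ j → j + k = cols →
    ∀ (done : List (List Int)) (cur : List Int) (rest : List (List Int)),
      (PySem.List.pyRange ((done.length : Int) * cols + j) ((done.length : Int) * cols + cols) 1).foldl
        (fun (bs : List (List Int)) i =>
          bs.modify (PySem.Int.floordiv i cols).toNat
            (fun r => r ++ [PySem.List.pyGetD flat i 0]))
        (done ++ cur :: rest)
      = done ++ (cur ++ (List.range k).map
          (fun (s : Nat) => PySem.List.pyGetD flat ((done.length : Int) * cols + j + (s : Int)) 0)) :: rest := by
  intro k
  induction k with
  | zero =>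
    intro j hj hjk done cur rest
    push_cast at hjk
    rw [PySem.List.pyRange_one_eq_nil (by omega)]
    simp
  | succ k ih =>
    intro j hj hjk done cur rest
    push_cast at hjk
    rw [PySem.List.pyRange_one_cons (by omega)]
    simp only [List.foldl_cons]
    have hfd : PySem.Int.floordiv ((done.length : Int) * cols + j) cols = (done.length : Int) := by
      rw [PySem.Int.floordiv_eq_iff_of_pos hc]
      constructor
      · omega
      · have h1 : ((done.length : Int) + 1) * cols = (done.length : Int) * cols + cols := by ring
        omega
    rw [hfd]
    simp only [Int.toNat_natCast]
    rw [pvModifyAppend]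
    have hstep := ih (j + 1) (by omega) (by omega) done
      (cur ++ [PySem.List.pyGetD flat ((done.length : Int) * cols + j) 0]) rest
    rw [show (done.length : Int) * cols + j + 1 = (done.length : Int) * cols + (j + 1) from by ring]
    rw [hstep]
    congr 2
    rw [List.range_succ_eq_map]
    simp only [List.map_cons, List.map_map, Nat.cast_zero, add_zero, List.append_assoc,
      List.singleton_append]
    congr 1
    congr 1
    apply List.map_congr_left
    intro s _
    simp only [Function.comp]
    congr 1
    push_cast
    ring

-- B's whole loop: starting after `done` finished rows with k empty buckets left, the
-- remaining index block fills the k buckets with the successive cols-sized chunks.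
theorem pvOuterB (flat : List Int) (cols : Int) (hc : 0 < cols) :
    ∀ (k : Nat) (done : List (List Int)),
      (PySem.List.pyRange ((done.length : Int) * cols) (((done.length + k : Nat) : Int) * cols) 1).foldl
        (fun (bs : List (List Int)) i =>
          bs.modify (PySem.Int.floordiv i cols).toNat
            (fun r => r ++ [PySem.List.pyGetD flat i 0]))
        (done ++ List.replicate k ([] : List Int))
      = done ++ (List.range k).map (fun (t : Nat) =>
          (List.range cols.toNat).map
            (fun (s : Nat) => PySem.List.pyGetD flat (((done.length + t : Nat) : Int) * cols + (s : Int)) 0)) := by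
  intro k
  induction k with
  | zero =>
    intro done
    rw [PySem.List.pyRange_one_eq_nil (le_of_eq (by push_cast; ring))]
    simp
  | succ k ih =>
    intro done
    have hcN : ((cols.toNat : Int)) = cols := Int.toNat_of_nonneg (le_of_lt hc)
    have hsplit : PySem.List.pyRange ((done.length : Int) * cols) (((done.length + (k + 1) : Nat) : Int) * cols) 1
        = PySem.List.pyRange ((done.length : Int) * cols) ((done.length : Int) * cols + cols) 1
          ++ PySem.List.pyRange ((done.length : Int) * cols + cols) (((done.length + (k + 1) : Nat) : Int) * cols) 1 := by
      apply PySem.List.pyRange_one_append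
      · omega
      · have h1 : (((done.length + (k + 1) : Nat) : Int)) * cols
            = (done.length : Int) * cols + cols + (k : Int) * cols := by push_cast; ring
        have h2 : 0 ≤ (k : Int) * cols := by positivity
        omega
    rw [hsplit, List.foldl_append, List.replicate_succ]
    have hrow := pvRowB flat cols hc cols.toNat 0 le_rfl (by omega) done ([] : List Int)
      (List.replicate k ([] : List Int))
    simp only [add_zero, List.nil_append] at hrow
    rw [hrow]
    have hassoc : done ++ ((List.range cols.toNat).map
          (fun (s : Nat) => PySem.List.pyGetD flat ((done.length : Int) * cols + (s : Int)) 0)) ::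
            List.replicate k ([] : List Int)
        = (done ++ [(List.range cols.toNat).map
            (fun (s : Nat) => PySem.List.pyGetD flat ((done.length : Int) * cols + (s : Int)) 0)])
          ++ List.replicate k ([] : List Int) := by simp
    rw [hassoc]
    have hstart : (done.length : Int) * cols + cols
        = (((done ++ [(List.range cols.toNat).map
            (fun (s : Nat) => PySem.List.pyGetD flat ((done.length : Int) * cols + (s : Int)) 0)]).length : Int)) * cols := by
      simp only [List.length_append, List.length_cons, List.length_nil]
      push_cast
      ring
    have hend : (((done.length + (k + 1) : Nat) : Int)) * cols
        = ((((done ++ [(List.range cols.toNat).map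
            (fun (s : Nat) => PySem.List.pyGetD flat ((done.length : Int) * cols + (s : Int)) 0)]).length + k : Nat) : Int)) * cols := by
      simp only [List.length_append, List.length_cons, List.length_nil]
      push_cast
      ring
    rw [hstart, hend, ih]
    simp only [List.length_append, List.length_cons, List.length_nil, List.append_assoc,
      List.singleton_append]
    congr 1
    rw [List.range_succ_eq_map]
    simp only [List.map_cons, List.map_map, Nat.add_zero]
    congr 1
    apply List.map_congr_left
    intro t _
    simp only [Function.comp]
    apply List.map_congr_left
    intro s _
    congr 2
    push_cast
    ring

-- overwriting position n and then taking n+1 elements appends the new value to the n-prefix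
theorem pvTakeSet (l : List Int) (n : Nat) (h : n < l.length) (z : Int) :
    (l.set n z).take (n + 1) = l.take n ++ [z] := by
  rw [List.take_add_one, List.getElem?_set_self h]
  congr 1
  apply List.ext_getElem (by simp)
  intro i h1 h2
  simp only [List.getElem_take, List.getElem_set]
  rw [if_neg (by simp at h1; omega)]

-- A's inner loop: filling columns j..cols-1 of row `row` from flat starting at index i.
theorem pvInnerA (flat : List Int) (cols : Int) :
    ∀ (k : Nat) (j : Int), 0 ≤ j → j + k = cols →
    ∀ (res : List (List Int)) (row : Int) (z : List Int) (i : Int),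
      0 ≤ row → row.toNat < res.length → res[row.toNat]? = some z → z.length = j.toNat + k →
      (PySem.List.pyRange j cols 1).foldl
        (fun (st : List (List Int) × Int) col =>
          (PySem.List.pySetD st.1 row
            (PySem.List.pySetD (PySem.List.pyGetD st.1 row []) col
              (PySem.List.pyGetD flat st.2 0)),
           st.2 + 1)) (res, i)
      = (res.set row.toNat
          (z.take j.toNat ++ (List.range k).map (fun (t : Nat) => PySem.List.pyGetD flat (i + (t : Int)) 0)),
         i + k) := by
  intro k
  induction k with
  | zero =>
    intro j hj hjk res row z i hr hlt hget hzlen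
    push_cast at hjk
    rw [PySem.List.pyRange_one_eq_nil (by omega)]
    simp only [List.foldl_nil, List.range_zero, List.map_nil, List.append_nil, Nat.cast_zero,
      add_zero]
    have hgetE : res[row.toNat] = z := by
      have h' := List.getElem?_eq_getElem (l := res) hlt
      rw [hget] at h'
      exact (Option.some.inj h').symm
    rw [List.take_of_length_le (by omega), ← hgetE, List.set_getElem_self hlt]
  | succ k ih =>
    intro j hj hjk res row z i hr hlt hget hzlen
    push_cast at hjk
    rw [PySem.List.pyRange_one_cons (by omega)]
    simp only [List.foldl_cons]
    have hgetE : res[row.toNat] = z := by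
      have h' := List.getElem?_eq_getElem (l := res) hlt
      rw [hget] at h'
      exact (Option.some.inj h').symm
    have h1 : PySem.List.pyGetD res row ([] : List Int) = z := by
      rw [PySem.List.pyGetD_eq_getElem res [] hr (by omega)]
      exact hgetE
    rw [h1, PySem.List.pySetD_of_nonneg _ _ hj, PySem.List.pySetD_of_nonneg _ _ hr]
    rw [ih (j + 1) (by omega) (by omega)
      (res.set row.toNat (z.set j.toNat (PySem.List.pyGetD flat i 0))) row
      (z.set j.toNat (PySem.List.pyGetD flat i 0)) (i + 1) hr
      (by simpa using hlt)
      (by simpa using List.getElem?_set_self (l := res) (a := z.set j.toNat (PySem.List.pyGetD flat i 0)) hlt)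
      (by simp; omega)]
    rw [List.set_set, show (j + 1).toNat = j.toNat + 1 from by omega,
      pvTakeSet z j.toNat (by omega) _]
    congr 1
    · congr 1
      rw [List.append_assoc]
      congr 1
      rw [List.range_succ_eq_map]
      simp only [List.map_cons, List.map_map, Nat.cast_zero, add_zero, List.singleton_append]
      congr 1
      apply List.map_congr_left
      intro t _
      simp only [Function.comp]
      congr 1
      push_cast
      ring
    · push_cast
      ring

-- A's outer loop: rows r..rows-1 of the zero matrix get overwritten with flat's values.
theorem pvOuterA (flat : List Int) (rows cols : Int) (hc : 0 < cols) :
    ∀ (k : Nat) (r : Int), 0 ≤ r → r + k = rows →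
    ∀ (done : List (List Int)) (i : Int), done.length = r.toNat →
      (PySem.List.pyRange r rows 1).foldl
        (fun (st : List (List Int) × Int) row =>
          (PySem.List.pyRange 0 cols 1).foldl
            (fun (st : List (List Int) × Int) col =>
              (PySem.List.pySetD st.1 row
                (PySem.List.pySetD (PySem.List.pyGetD st.1 row []) col
                  (PySem.List.pyGetD flat st.2 0)),
               st.2 + 1)) st)
        (done ++ List.replicate k ((PySem.List.pyRange 0 cols 1).map (fun _ => (0 : Int))), i)
      = (done ++ (List.range k).map (fun (t : Nat) =>
            (List.range cols.toNat).map (fun (s : Nat) => PySem.List.pyGetD flat (i + (t : Int) * cols + (s : Int)) 0)),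
         i + k * cols) := by
  have hc' : ((cols.toNat : Int)) = cols := Int.toNat_of_nonneg (le_of_lt hc)
  intro k
  induction k with
  | zero =>
    intro r hr hrk done i hdone
    push_cast at hrk
    rw [PySem.List.pyRange_one_eq_nil (show rows ≤ r by omega)]
    simp
  | succ k ih =>
    intro r hr hrk done i hdone
    push_cast at hrk
    rw [PySem.List.pyRange_one_cons (show r < rows by omega)]
    simp only [List.foldl_cons, List.replicate_succ]
    have hreslen : r.toNat <
        (done ++ ((PySem.List.pyRange 0 cols 1).map (fun _ => (0 : Int))) ::
          List.replicate k ((PySem.List.pyRange 0 cols 1).map (fun _ => (0 : Int)))).length := by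
      simp [hdone]
    have hget : (done ++ ((PySem.List.pyRange 0 cols 1).map (fun _ => (0 : Int))) ::
          List.replicate k ((PySem.List.pyRange 0 cols 1).map (fun _ => (0 : Int))))[r.toNat]? =
        some ((PySem.List.pyRange 0 cols 1).map (fun _ => (0 : Int))) := by
      rw [List.getElem?_append_right (le_of_eq hdone)]
      simp [hdone]
    rw [pvInnerA flat cols cols.toNat 0 le_rfl (by simpa using hc') _ r _ i hr hreslen hget
      (by simp [PySem.List.length_pyRange_one])]
    simp only [Int.toNat_zero, List.take_zero, List.nil_append]
    have hset : (done ++ ((PySem.List.pyRange 0 cols 1).map (fun _ => (0 : Int))) ::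
          List.replicate k ((PySem.List.pyRange 0 cols 1).map (fun _ => (0 : Int)))).set r.toNat
          ((List.range cols.toNat).map (fun (s : Nat) => PySem.List.pyGetD flat (i + (s : Int)) 0))
        = (done ++ [(List.range cols.toNat).map (fun (s : Nat) => PySem.List.pyGetD flat (i + (s : Int)) 0)]) ++
          List.replicate k ((PySem.List.pyRange 0 cols 1).map (fun _ => (0 : Int))) := by
      rw [List.set_append, if_neg (by omega), hdone]
      simp
    rw [hset]
    rw [ih (r + 1) (by omega) (by omega) _ (i + cols.toNat) (by simp [hdone]; omega)]
    congr 1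
    · rw [List.append_assoc]
      congr 1
      rw [List.range_succ_eq_map]
      simp only [List.map_cons, List.map_map, Nat.cast_zero, List.singleton_append]
      congr 1
      · congr 1
        funext s
        congr 2
        ring
      · apply List.map_congr_left
        intro t _
        simp only [Function.comp]
        congr 1
        funext s
        congr 2
        push_cast [hc']
        ring
    · push_cast [hc']
      ring

-- ===== VERDICT (by name: the statement is the Claim_ definition above) =====
theorem convert1d_array_to2d_spec : Claim_equal_convert1d_array_to2d := by
  intro flat_array rows cols _ hpre
  unfold Spec_convert1d_array_to2d convert1d_array_to2d convert1d_array_to2d_alt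
  unfold Pre_convert1d_array_to2d at hpre
  simp only []
  rw [if_neg (not_lt.mpr hpre), if_neg (not_lt.mpr hpre)]
  set flat := flat_array.getD pvDefault with hflat
  by_cases hrows : rows ≤ 0
  · rw [PySem.List.pyRange_one_eq_nil hrows]
    simp only [List.map_nil, List.foldl_nil, List.length_nil, Nat.cast_zero, zero_mul]
    rw [PySem.List.pyRange_one_eq_nil le_rfl]
    simp
  rw [not_le] at hrows
  have hrN : ((rows.toNat : Int)) = rows := Int.toNat_of_nonneg (le_of_lt hrows)
  have hbuckets : (PySem.List.pyRange 0 rows 1).map (fun _ => ([] : List Int))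
      = List.replicate rows.toNat ([] : List Int) := by
    rw [List.map_const', PySem.List.length_pyRange_one]
    congr 1
    omega
  rw [hbuckets]
  by_cases hcols : cols ≤ 0
  · rw [PySem.List.pyRange_one_eq_nil hcols]
    simp only [List.map_nil, List.foldl_nil]
    rw [List.foldl_fixed]
    rw [PySem.List.pyRange_one_eq_nil
      (by nlinarith [Int.natCast_nonneg (List.replicate rows.toNat ([] : List Int)).length] :
        ((List.replicate rows.toNat ([] : List Int)).length : Int) * cols ≤ 0)]
    simp only [List.foldl_nil]
    rw [hbuckets]
  rw [not_le] at hcols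
  have hcN : ((cols.toNat : Int)) = cols := Int.toNat_of_nonneg (le_of_lt hcols)
  -- A side
  have hinit : (PySem.List.pyRange 0 rows 1).map
        (fun _ => (PySem.List.pyRange 0 cols 1).map (fun _ => (0 : Int)))
      = List.replicate rows.toNat ((PySem.List.pyRange 0 cols 1).map (fun _ => (0 : Int))) := by
    rw [List.map_const', PySem.List.length_pyRange_one]
    congr 1
    omega
  rw [hinit]
  have hA := pvOuterA flat rows cols hcols rows.toNat 0 le_rfl (by omega) [] 0 (by simp)
  simp only [List.nil_append] at hA
  rw [hA]
  -- B side
  rw [show ((((List.replicate rows.toNat ([] : List Int)).length : Int)) * cols) = rows * cols from by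
    simp [hrN]]
  rw [show (List.replicate rows.toNat ([] : List Int)) =
    ([] : List (List Int)) ++ List.replicate rows.toNat ([] : List Int) from by simp]
  have hB := pvOuterB flat cols hcols rows.toNat []
  rw [show (((([] : List (List Int)).length : Int)) * cols) = (0 : Int) from by simp,
    show ((((([] : List (List Int)).length + rows.toNat : Nat)) : Int) * cols) = rows * cols from by
      simp [hrN]] at hB
  rw [hB]
  simp only [List.nil_append, List.length_nil, Nat.zero_add]
  apply List.map_congr_left
  intro t _
  apply List.map_congr_left
  intro s _
  congr 1
  ring
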